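-- pv_equiv track=rewrite | github.com/davidkimai/The-Recursive-Field | fractal.json/encoder.py | _detect_list_patterns
-- ===== SOURCE A (Python) =====
-- from typing import Any, Dict, List, Optional, Tuple
--
-- def _detect_list_patterns(data: List) -> List[List[Any]]:
--     """
--     Detect repeating patterns in lists.
--     """
--     if len(data) < 2:
--         return []
--
--     # Find repeating subsequences using suffix arrays
--     patterns = []
--     for pattern_length in range(1, len(data) // 2 + 1):
--         for i in range(len(data) - pattern_length + 1):
--             pattern = data[i:i + pattern_length]
--             # Check if pattern repeats
--             occurrences = 0
--             for j in range(i, len(data) - pattern_length + 1, pattern_length):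
--                 if data[j:j + pattern_length] == pattern:
--                     occurrences += 1
--
--             if occurrences >= 2:
--                 patterns.append((pattern, occurrences))
--
--     # Sort by coverage and return best patterns
--     if patterns:
--         patterns.sort(key=lambda x: len(x[0]) * x[1], reverse=True)
--         return [p[0] for p in patterns[:3]]  # Return top 3 patterns
--
--     return []
-- ===== SOURCE B (Python) =====
-- from typing import Any, List
--
--
-- def _detect_list_patterns(data: List) -> List[List[Any]]:
--     """
--     Detect repeating patterns in lists.
--
--     Per pattern length, occurrence counts are obtained with one hash-counter
--     sweep per residue class (no inner rescan), and the top-3 patterns are kept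
--     with a bounded stable insertion instead of sorting everything.
--     """
--     n = len(data)
--     if n < 2:
--         return []
--
--     best = []  # at most 3 of (coverage, pattern), coverage-descending, stable
--     for length in range(1, n // 2 + 1):
--         m = n - length + 1  # number of window starts
--         occ = {}
--         for r in range(length):
--             counts = {}
--             for j in reversed(range(r, m, length)):
--                 t = tuple(data[j:j + length])
--                 c = counts.get(t, 0) + 1
--                 counts[t] = c
--                 occ[j] = c
--         for i in range(m):
--             c = occ.get(i, 0)
--             if c >= 2:
--                 best = _insert_top3(best, length * c, data[i:i + length])
--     return [pattern for _, pattern in best]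
--
--
-- def _insert_top3(best, coverage, pattern):
--     """Insert keeping coverage-descending stable order, truncated to 3."""
--     pos = 0
--     while pos < len(best) and best[pos][0] >= coverage:
--         pos += 1
--     if pos < 3:
--         best = best[:pos] + [(coverage, pattern)] + best[pos:]
--         if len(best) > 3:
--             best = best[:3]
--     return best
-- ===== Notes on version B (the rewrite author's own statement) =====
-- stated objective: alternative
-- what changed: Occurrence counts come from one hash-counter sweep per residue class (a dict of suffix counts replaces A's inner rescan of every window), and the top-3 patterns are kept by bounded stable insertion into a 3-slot list instead of fully sorting all candidates.
import Mathlib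
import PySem

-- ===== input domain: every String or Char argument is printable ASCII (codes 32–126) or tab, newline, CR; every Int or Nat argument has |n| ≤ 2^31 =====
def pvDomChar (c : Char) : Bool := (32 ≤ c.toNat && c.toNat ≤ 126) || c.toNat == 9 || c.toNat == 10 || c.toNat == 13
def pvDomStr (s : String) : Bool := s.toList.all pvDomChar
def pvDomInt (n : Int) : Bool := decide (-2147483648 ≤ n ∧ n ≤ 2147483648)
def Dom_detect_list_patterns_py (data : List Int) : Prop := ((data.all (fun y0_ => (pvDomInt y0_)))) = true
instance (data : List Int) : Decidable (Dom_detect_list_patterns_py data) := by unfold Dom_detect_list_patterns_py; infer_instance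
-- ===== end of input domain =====

-- B replaces A's per-window rescan by one hash-counter sweep per residue class and keeps
-- only the top-3 patterns with a bounded stable insertion instead of a full sort (alternative
-- decomposition; measured cost is comparable).


-- ===== PORT A =====
-- literal transliteration of _detect_list_patterns (Source A)
def detect_list_patterns_py (data : List Int) : List (List Int) :=
  if data.length < 2 then []
  else
    let n : Int := (data.length : Int)
    let patterns : List (List Int × Int) :=
      (PySem.List.pyRange 1 (PySem.Int.floordiv n 2 + 1) 1).foldl (fun pats pl =>
        (PySem.List.pyRange 0 (n - pl + 1) 1).foldl (fun pats i =>
          let pattern := PySem.List.slice data (some i) (some (i + pl))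
          let occurrences : Int :=
            (PySem.List.pyRange i (n - pl + 1) pl).foldl (fun occ j =>
              if PySem.List.slice data (some j) (some (j + pl)) = pattern then occ + 1
              else occ) 0
          if occurrences ≥ 2 then pats ++ [(pattern, occurrences)] else pats) pats) []
    if patterns ≠ [] then
      (PySem.List.slice (PySem.List.sorted patterns (fun x => ((x.1.length : Int)) * x.2) true)
        none (some 3)).map (fun p => p.1)
    else []

-- ===== PORT B =====
-- helper _insert_top3 (Source B): the pos-scan while loop is rendered as takeWhile length
def insertTop3 (best : List (Int × List Int)) (coverage : Int) (pattern : List Int) :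
    List (Int × List Int) :=
  let pos := (best.takeWhile (fun p => decide (coverage ≤ p.1))).length
  if pos < 3 then
    let best' := best.take pos ++ (coverage, pattern) :: best.drop pos
    if best'.length > 3 then best'.take 3 else best'
  else best

-- literal transliteration of Source B's _detect_list_patterns; the tuple(data[j:j+length]) dict key
-- is the List Int slice itself, reversed(range(r, m, length)) is (pyRange r m length).reverse
def detect_list_patterns_py_alt (data : List Int) : List (List Int) :=
  let n : Int := (data.length : Int)
  if data.length < 2 then []
  else
    let best : List (Int × List Int) :=
      (PySem.List.pyRange 1 (PySem.Int.floordiv n 2 + 1) 1).foldl (fun best len =>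
        let m := n - len + 1
        let occ : PySem.Dict Int Int :=
          (PySem.List.pyRange 0 len 1).foldl (fun occ r =>
            ((PySem.List.pyRange r m len).reverse.foldl
              (fun (st : PySem.Dict (List Int) Int × PySem.Dict Int Int) j =>
                let t := PySem.List.slice data (some j) (some (j + len))
                let c := st.1.getD t 0 + 1
                (st.1.insert t c, st.2.insert j c))
              (PySem.Dict.empty, occ)).2) PySem.Dict.empty
        (PySem.List.pyRange 0 m 1).foldl (fun best i =>
          let c := occ.getD i 0
          if c ≥ 2 then
            insertTop3 best (len * c) (PySem.List.slice data (some i) (some (i + len)))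
          else best) best) []
    best.map (fun p => p.2)

-- ===== PRECONDITION & SPEC =====
def Spec_detect_list_patterns_py (data : List Int) (out : List (List Int)) : Prop := out = detect_list_patterns_py_alt data
instance (data : List Int) (out : List (List Int)) : Decidable (Spec_detect_list_patterns_py data out) := by unfold Spec_detect_list_patterns_py; infer_instance

-- ===== CLAIM (what is proved, stated in full; the proofs are below) =====
def Claim_equal_detect_list_patterns_py : Prop := ∀ (data : List Int), Dom_detect_list_patterns_py data → Spec_detect_list_patterns_py data (detect_list_patterns_py data)

-- ===== LEMMAS AND PROOFS =====

-- window data[j:j+L]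
def pvSlc (data : List Int) (L j : Int) : List Int :=
  PySem.List.slice data (some j) (some (j + L))

-- A's occurrence count for window start i at length L (m = n - L + 1)
def pvCnt (data : List Int) (L m i : Int) : Int :=
  (((PySem.List.pyRange i m L).countP (fun j => decide (pvSlc data L j = pvSlc data L i))) : Int)

-- B's counter step (identical to the inner lambda of port B)
def pvCstep (data : List Int) (L : Int)
    (st : PySem.Dict (List Int) Int × PySem.Dict Int Int) (j : Int) :
    PySem.Dict (List Int) Int × PySem.Dict Int Int :=
  let t := PySem.List.slice data (some j) (some (j + L))
  let c := st.1.getD t 0 + 1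
  (st.1.insert t c, st.2.insert j c)

-- A's sort key and the pairing A-item ↦ B-item
def pvKf (x : List Int × Int) : Int := ((x.1.length : Int)) * x.2
def pvG (x : List Int × Int) : Int × List Int := (pvKf x, x.1)

-- A's inner (per-i) step, identical to the lambda in port A
def pvAstep (data : List Int) (n pl : Int) (pats : List (List Int × Int)) (i : Int) :
    List (List Int × Int) :=
  let pattern := PySem.List.slice data (some i) (some (i + pl))
  let occurrences : Int :=
    (PySem.List.pyRange i (n - pl + 1) pl).foldl (fun occ j =>
      if PySem.List.slice data (some j) (some (j + pl)) = pattern then occ + 1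
      else occ) 0
  if occurrences ≥ 2 then pats ++ [(pattern, occurrences)] else pats

-- B's inner (per-i) step and per-length step, identical to the lambdas in port B
def pvBstep (data : List Int) (len : Int) (occ : PySem.Dict Int Int)
    (best : List (Int × List Int)) (i : Int) : List (Int × List Int) :=
  let c := occ.getD i 0
  if c ≥ 2 then
    insertTop3 best (len * c) (PySem.List.slice data (some i) (some (i + len)))
  else best

def pvBocc (data : List Int) (n len : Int) : PySem.Dict Int Int :=
  (PySem.List.pyRange 0 len 1).foldl (fun occ r =>
    ((PySem.List.pyRange r (n - len + 1) len).reverse.foldl (pvCstep data len)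
      (PySem.Dict.empty, occ)).2) PySem.Dict.empty

-- the invariant tying A's accumulated pattern list to B's top-3 list
def pvInv (pats : List (List Int × Int)) (best : List (Int × List Int)) : Prop :=
  best = ((PySem.List.sorted pats pvKf true).take 3).map pvG

-- counting fold = countP
theorem pv_foldl_count {α : Type} (q : α → Prop) [DecidablePred q] :
    ∀ (l : List α) (c : Int),
      l.foldl (fun acc j => if q j then acc + 1 else acc) c
        = c + ((l.countP (fun j => decide (q j))) : Int) := by
  intro l
  induction l with
  | nil => intro c; simp
  | cons a l ih =>
    intro c
    simp only [List.foldl_cons, List.countP_cons, ih]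
    by_cases h : q a
    · simp [h]; omega
    · simp [h]

-- pyRange with positive step: nil and cons views
theorem pv_pyRange_nil {a b s : Int} (hs : 0 < s) (h : b ≤ a) :
    PySem.List.pyRange a b s = [] := by
  rw [PySem.List.pyRange_of_pos _ _ hs]
  simp [show ¬ a < b from not_lt.mpr h]

theorem pv_pyRange_cons {a b s : Int} (hs : 0 < s) (h : a < b) :
    PySem.List.pyRange a b s = a :: PySem.List.pyRange (a + s) b s := by
  rw [PySem.List.pyRange_of_pos _ _ hs, PySem.List.pyRange_of_pos _ _ hs]
  by_cases h2 : a + s < b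
  · have key : (b - a + s - 1) / s = (b - (a + s) + s - 1) / s + 1 := by
      have hh := Int.add_mul_ediv_right (b - (a + s) + s - 1) 1 (ne_of_gt hs)
      have harg : b - a + s - 1 = b - (a + s) + s - 1 + 1 * s := by ring
      rw [harg, hh]
    have hq : 0 ≤ (b - (a + s) + s - 1) / s := by
      apply Int.ediv_nonneg _ (le_of_lt hs); omega
    have htn : ((b - a + s - 1) / s).toNat = ((b - (a + s) + s - 1) / s).toNat + 1 := by
      omega
    rw [if_pos h, if_pos h2, htn, List.range_succ_eq_map]
    simp only [List.map_cons, List.map_map]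
    refine congrArg₂ _ (by simp) ?_
    apply List.map_congr_left
    intro k _
    simp only [Function.comp_apply]
    push_cast
    ring
  · have hb : b ≤ a + s := not_lt.mp h2
    have hq1 : (b - a + s - 1) / s = 1 := by
      have h1 : 1 ≤ (b - a + s - 1) / s := by
        rw [Int.le_ediv_iff_mul_le hs]; omega
      have h2' : (b - a + s - 1) / s < 2 := by
        rw [Int.ediv_lt_iff_lt_mul hs]; omega
      omega
    rw [if_pos h, if_neg (not_lt.mpr hb), hq1]
    norm_num

theorem pv_nodup_pyRange {a b s : Int} (hs : 0 < s) :
    (PySem.List.pyRange a b s).Nodup := by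
  rw [PySem.List.pyRange_of_pos _ _ hs]
  refine List.Nodup.map ?_ (List.nodup_range)
  intro k k' hkk
  simp only at hkk
  have h1 : s * (k : Int) = s * (k' : Int) := by omega
  have h2 := mul_left_cancel₀ (ne_of_gt hs) h1
  exact_mod_cast h2

-- a tail of an arithmetic range is the range from its head
theorem pv_pyRange_suffix {m L : Int} (hL : 0 < L) :
    ∀ (pre : List Int) (r j : Int) (post : List Int),
      PySem.List.pyRange r m L = pre ++ j :: post →
      j :: post = PySem.List.pyRange j m L := by
  intro pre
  induction pre with
  | nil =>
    intro r j post h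
    have hr : r < m := by
      by_contra hh
      rw [pv_pyRange_nil hL (not_lt.mp hh)] at h
      simp at h
    rw [pv_pyRange_cons hL hr] at h
    simp only [List.nil_append] at h
    injection h with h1 h2
    subst h1; subst h2
    rw [pv_pyRange_cons hL hr]
  | cons x pre ih =>
    intro r j post h
    have hr : r < m := by
      by_contra hh
      rw [pv_pyRange_nil hL (not_lt.mp hh)] at h
      simp at h
    rw [pv_pyRange_cons hL hr] at h
    simp only [List.cons_append] at h
    injection h with h1 h2
    exact ih _ _ _ h2

theorem pv_mem_pyRange_pos {a b s x : Int} (hs : 0 < s) :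
    x ∈ PySem.List.pyRange a b s ↔ a ≤ x ∧ x < b ∧ s ∣ x - a :=
  PySem.List.mem_pyRange_iff_of_pos hs x

-- the counter/occurrence fold over one residue class, generic form
theorem pv_classFold (data : List Int) (L : Int) :
    ∀ (ps : List Int) (seen : List (List Int)) (counts : PySem.Dict (List Int) Int)
      (occ : PySem.Dict Int Int),
      (∀ t, counts.getD t 0 = (seen.count t : Int)) → ps.Nodup →
      (∀ t, (ps.foldl (pvCstep data L) (counts, occ)).1.getD t 0
          = (((ps.map (pvSlc data L)).count t : Int) + (seen.count t : Int)))
      ∧ (∀ j, j ∉ ps → (ps.foldl (pvCstep data L) (counts, occ)).2.getD j 0 = occ.getD j 0)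
      ∧ (∀ pre j post, ps = pre ++ j :: post →
          (ps.foldl (pvCstep data L) (counts, occ)).2.getD j 0
            = ((pre.map (pvSlc data L)).count (pvSlc data L j) : Int)
              + (seen.count (pvSlc data L j) : Int) + 1) := by
  intro ps
  induction ps with
  | nil =>
    intro seen counts occ hc _
    refine ⟨by intro t; simpa using hc t, by intro j _; rfl, ?_⟩
    intro pre j post h
    exact absurd h (by simp)
  | cons p rest ih =>
    intro seen counts occ hc hnd
    have hnd' := (List.nodup_cons.mp hnd).2
    have hp : p ∉ rest := (List.nodup_cons.mp hnd).1
    have hstep : pvCstep data L (counts, occ) p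
        = (counts.insert (pvSlc data L p) (counts.getD (pvSlc data L p) 0 + 1),
           occ.insert p (counts.getD (pvSlc data L p) 0 + 1)) := rfl
    have hc1 : ∀ t, (counts.insert (pvSlc data L p) (counts.getD (pvSlc data L p) 0 + 1)).getD t 0
        = ((pvSlc data L p :: seen).count t : Int) := by
      intro t
      rw [PySem.Dict.getD_insert]
      by_cases ht : t = pvSlc data L p
      · subst ht; rw [if_pos rfl, hc]; simp
      · rw [if_neg ht, hc]
        simp [Ne.symm ht]
    obtain ⟨ha, hb, hcc⟩ := ih (pvSlc data L p :: seen) _ _ hc1 hnd'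
    simp only [List.foldl_cons, hstep]
    refine ⟨?_, ?_, ?_⟩
    · intro t
      rw [ha t]
      simp only [List.map_cons, List.count_cons]
      by_cases ht : t = pvSlc data L p
      · simp [ht]; omega
      · simp; omega
    · intro j hj
      have hj1 : j ≠ p := by intro hh; exact hj (hh ▸ List.mem_cons_self)
      have hj2 : j ∉ rest := fun hh => hj (List.mem_cons_of_mem _ hh)
      rw [hb j hj2, PySem.Dict.getD_insert, if_neg hj1]
    · intro pre j post h
      cases pre with
      | nil =>
        simp only [List.nil_append] at h
        injection h with h1 h2
        subst h1; subst h2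
        rw [hb p hp, PySem.Dict.getD_insert, if_pos rfl, hc]
        simp
      | cons q pre' =>
        simp only [List.cons_append] at h
        injection h with h1 h2
        have hq : q = p := h1.symm
        have hrest : rest = pre' ++ j :: post := h2
        rw [hcc pre' j post hrest]
        subst hq
        simp only [List.map_cons, List.count_cons]
        by_cases ht : pvSlc data L j = pvSlc data L q
        · simp [ht]; omega
        · simp; omega
  
-- the empty dict holds no counts
theorem pv_getD_empty {κ ν : Type} [BEq κ] (k : κ) (d : ν) :
    (PySem.Dict.empty : PySem.Dict κ ν).getD k d = d := rfl

-- one residue-class sweep computes A's occurrence count for every start of the class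
theorem pv_class_occ (data : List Int) (L m : Int) (hL : 0 < L) (r i : Int)
    (hi : i ∈ PySem.List.pyRange r m L) (occ0 : PySem.Dict Int Int) :
    (((PySem.List.pyRange r m L).reverse.foldl (pvCstep data L)
        (PySem.Dict.empty, occ0)).2).getD i 0 = pvCnt data L m i := by
  obtain ⟨pre, post, hdec⟩ := List.append_of_mem hi
  have hsuf : i :: post = PySem.List.pyRange i m L := pv_pyRange_suffix hL pre r i post hdec
  have hrev : (PySem.List.pyRange r m L).reverse = post.reverse ++ i :: pre.reverse := by
    rw [hdec]; simp
  have hnd : ((PySem.List.pyRange r m L).reverse).Nodup := by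
    rw [List.nodup_reverse]; exact pv_nodup_pyRange hL
  have hce : ∀ t, (PySem.Dict.empty : PySem.Dict (List Int) Int).getD t 0
      = (([] : List (List Int)).count t : Int) := by
    intro t; rw [pv_getD_empty]; simp
  obtain ⟨_, _, hcc⟩ := pv_classFold data L ((PySem.List.pyRange r m L).reverse) [] _ occ0 hce hnd
  rw [hcc post.reverse i pre.reverse hrev]
  rw [pvCnt, ← hsuf, List.countP_cons]
  have hct : (post.reverse.map (pvSlc data L)).count (pvSlc data L i)
      = post.countP (fun j => decide (pvSlc data L j = pvSlc data L i)) := by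
    rw [List.map_reverse, List.count_reverse]
    rw [List.count_eq_countP', List.countP_map]
    apply List.countP_congr
    intro x _
    simp [Function.comp]
  rw [hct]
  simp

-- two distinct residues have disjoint classes
theorem pv_class_disjoint {m L r r' i : Int} (hL : 0 < L)
    (h1 : i ∈ PySem.List.pyRange r m L) (h2 : i ∈ PySem.List.pyRange r' m L)
    (hr : 0 ≤ r) (hrL : r < L) (hr' : 0 ≤ r') (hr'L : r' < L) : r = r' := by
  obtain ⟨-, -, k, hk⟩ := (pv_mem_pyRange_pos hL).mp h1
  obtain ⟨-, -, k', hk'⟩ := (pv_mem_pyRange_pos hL).mp h2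
  have hd : r - r' = L * (k' - k) := by
    have hh : i - r' - (i - r) = L * k' - L * k := by rw [← hk, ← hk']
    rw [mul_sub]; omega
  rcases lt_trichotomy (k' - k) 0 with hcase | hcase | hcase
  · have h1' : k' - k ≤ -1 := by omega
    have h2' : L * (k' - k) ≤ L * (-1) :=
      mul_le_mul_of_nonneg_left h1' (le_of_lt hL)
    have h3' : L * (-1) = -L := by ring
    omega
  · rw [hcase, mul_zero] at hd; omega
  · have h1' : (1 : Int) ≤ k' - k := by omega
    have h2' : L * 1 ≤ L * (k' - k) :=
      mul_le_mul_of_nonneg_left h1' (le_of_lt hL)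
    have h3' : L * 1 = L := by ring
    omega

-- the residue-class fold: values set by earlier classes persist, and every class is computed
theorem pv_occ_aux (data : List Int) (L m : Int) (hL : 0 < L) :
    ∀ (rs : List Int), rs.Nodup → (∀ r ∈ rs, 0 ≤ r ∧ r < L) →
    ∀ (occ0 : PySem.Dict Int Int),
      (∀ i, (∀ r ∈ rs, i ∉ PySem.List.pyRange r m L) →
        (rs.foldl (fun occ r => ((PySem.List.pyRange r m L).reverse.foldl (pvCstep data L)
          (PySem.Dict.empty, occ)).2) occ0).getD i 0 = occ0.getD i 0)
      ∧ (∀ i, (∃ r ∈ rs, i ∈ PySem.List.pyRange r m L) →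
        (rs.foldl (fun occ r => ((PySem.List.pyRange r m L).reverse.foldl (pvCstep data L)
          (PySem.Dict.empty, occ)).2) occ0).getD i 0 = pvCnt data L m i) := by
  intro rs
  induction rs with
  | nil => intro _ _ occ0; exact ⟨fun i _ => rfl, fun i h => by simp at h⟩
  | cons r0 rest ih =>
    intro hnd hrange occ0
    have hnd' := (List.nodup_cons.mp hnd).2
    have hr0 : r0 ∉ rest := (List.nodup_cons.mp hnd).1
    have hrange' : ∀ r ∈ rest, 0 ≤ r ∧ r < L := fun r hr => hrange r (List.mem_cons_of_mem _ hr)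
    have hr0b := hrange r0 List.mem_cons_self
    simp only [List.foldl_cons]
    set occ1 := ((PySem.List.pyRange r0 m L).reverse.foldl (pvCstep data L)
      (PySem.Dict.empty, occ0)).2 with hocc1
    obtain ⟨ihA, ihB⟩ := ih hnd' hrange' occ1
    have hce : ∀ t, (PySem.Dict.empty : PySem.Dict (List Int) Int).getD t 0
        = (([] : List (List Int)).count t : Int) := by
      intro t; rw [pv_getD_empty]; simp
    obtain ⟨-, hpres, -⟩ := pv_classFold data L ((PySem.List.pyRange r0 m L).reverse) [] _ occ0 hce
      (by rw [List.nodup_reverse]; exact pv_nodup_pyRange hL)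
    constructor
    · intro i hi
      rw [ihA i (fun r hr => hi r (List.mem_cons_of_mem _ hr))]
      rw [hocc1, hpres i (by rw [List.mem_reverse]; exact hi r0 List.mem_cons_self)]
    · intro i hi
      obtain ⟨r, hr, hir⟩ := hi
      by_cases hc0 : i ∈ PySem.List.pyRange r0 m L
      · have hval : occ1.getD i 0 = pvCnt data L m i := pv_class_occ data L m hL r0 i hc0 occ0
        have hnotin : ∀ r' ∈ rest, i ∉ PySem.List.pyRange r' m L := by
          intro r' hr' hir'
          have hb := hrange' r' hr'
          have := pv_class_disjoint hL hc0 hir' hr0b.1 hr0b.2 hb.1 hb.2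
          exact hr0 (this ▸ hr')
        rw [ihA i hnotin, hval]
      · rcases List.mem_cons.mp hr with rfl | hr'
        · exact absurd hir hc0
        · exact ihB i ⟨r, hr', hir⟩

-- after all residue classes, B's occ dict holds A's occurrence counts
theorem pv_occ_all (data : List Int) (L n : Int) (hL : 0 < L) :
    ∀ i, 0 ≤ i → i < n - L + 1 →
      (pvBocc data n L).getD i 0 = pvCnt data L (n - L + 1) i := by
  intro i hi him
  obtain ⟨-, hB⟩ := pv_occ_aux data L (n - L + 1) hL (PySem.List.pyRange 0 L 1)
    (pv_nodup_pyRange (by norm_num))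
    (fun r hr => by
      have := PySem.List.mem_pyRange_one.mp hr; omega)
    PySem.Dict.empty
  apply hB
  refine ⟨i % L, ?_, ?_⟩
  · rw [PySem.List.mem_pyRange_one]
    exact ⟨Int.emod_nonneg i (ne_of_gt hL), Int.emod_lt_of_pos i hL⟩
  · rw [pv_mem_pyRange_pos hL]
    refine ⟨?_, him, ?_⟩
    · have h1 : i % L = i - L * (i / L) := Int.emod_def i L
      have h2 : 0 ≤ i / L := Int.ediv_nonneg hi (le_of_lt hL)
      have h3 : 0 ≤ L * (i / L) := mul_nonneg (le_of_lt hL) h2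
      omega
    · exact ⟨i / L, by rw [Int.emod_def]; ring⟩

-- insertBy in takeWhile/dropWhile form
theorem pv_insertBy_cons {α : Type} (bf : α → α → Bool) (x y : α) (ys : List α) :
    PySem.List.insertBy bf x (y :: ys)
      = if bf x y then x :: y :: ys else y :: PySem.List.insertBy bf x ys := rfl

theorem pv_insertBy_eq {α : Type} (bf : α → α → Bool) (x : α) :
    ∀ (l : List α), PySem.List.insertBy bf x l
      = l.takeWhile (fun y => !bf x y) ++ x :: l.dropWhile (fun y => !bf x y) := by
  intro l
  induction l with
  | nil => rfl
  | cons y ys ih =>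
    rw [pv_insertBy_cons]
    by_cases h : bf x y
    · simp [h]
    · simp [h, ih]

theorem pv_take_cons_take {α : Type} (k : Nat) (y : α) (ys : List α) :
    List.take k (y :: List.take k ys) = List.take k (y :: ys) := by
  cases k with
  | zero => simp
  | succ k' =>
    have hmin : min k' (k' + 1) = k' := by omega
    rw [List.take_succ_cons, List.take_succ_cons, List.take_take, hmin]

theorem pv_take_insertBy {α : Type} (bf : α → α → Bool) (x : α) :
    ∀ (k : Nat) (l : List α),
      (PySem.List.insertBy bf x l).take k = (PySem.List.insertBy bf x (l.take k)).take k := by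
  intro k l
  induction l generalizing k with
  | nil => simp
  | cons y ys ih =>
    cases k with
    | zero => simp
    | succ k' =>
      by_cases h : bf x y
      · simp only [pv_insertBy_cons, h, if_true, List.take_succ_cons]
        exact congrArg _ (pv_take_cons_take k' y ys).symm
      · simp only [pv_insertBy_cons, h, Bool.false_eq_true, if_false, List.take_succ_cons]
        exact congrArg _ (ih k')

-- mapping a key-preserving function through insertion
theorem pv_map_insertBy {α β : Type} (bf : α → α → Bool) (bf' : β → β → Bool) (g : α → β)
    (hcompat : ∀ a b, bf a b = bf' (g a) (g b)) (x : α) :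
    ∀ (l : List α), (PySem.List.insertBy bf x l).map g
      = PySem.List.insertBy bf' (g x) (l.map g) := by
  intro l
  induction l with
  | nil => rfl
  | cons y ys ih =>
    rw [pv_insertBy_cons, List.map_cons, pv_insertBy_cons]
    by_cases h : bf x y
    · have h' : bf' (g x) (g y) = true := hcompat x y ▸ h
      simp [h, h']
    · have h' : bf' (g x) (g y) = false := by rw [← hcompat]; simp [h]
      simp only [h, Bool.false_eq_true, if_false, List.map_cons, h']
      exact congrArg _ ih

-- insertTop3 is insertion followed by truncation to 3
theorem pv_insertTop3_eq (b : List (Int × List Int)) (hlen : b.length ≤ 3) (k : Int)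
    (p : List Int) :
    insertTop3 b k p
      = (PySem.List.insertBy (fun a b => decide (b.1 < a.1)) (k, p) b).take 3 := by
  have hpred : (fun (y : Int × List Int) => !(fun (a b : Int × List Int) => decide (b.1 < a.1)) (k, p) y)
      = (fun (y : Int × List Int) => decide (k ≤ y.1)) := by
    funext y
    simp only [← decide_not, decide_eq_decide]
    omega
  rw [pv_insertBy_eq, hpred]
  rw [insertTop3]
  have hsplit := List.takeWhile_append_dropWhile (p := fun (y : Int × List Int) => decide (k ≤ y.1)) (l := b)
  set tw := b.takeWhile (fun (y : Int × List Int) => decide (k ≤ y.1)) with htw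
  set dw := b.dropWhile (fun (y : Int × List Int) => decide (k ≤ y.1)) with hdw
  have hpre : tw <+: b := List.takeWhile_prefix _
  have htake : b.take tw.length = tw := (List.prefix_iff_eq_take.mp hpre).symm
  have hdrop : b.drop tw.length = dw := by
    conv_lhs => rw [← hsplit]
    rw [List.drop_left]
  have hlens : tw.length + dw.length = b.length := by
    have := congrArg List.length hsplit
    simpa using this
  by_cases hpos : tw.length < 3
  · rw [if_pos hpos, htake, hdrop]
    simp only [List.length_append, List.length_cons]
    by_cases h3 : tw.length + (dw.length + 1) > 3
    · rw [if_pos h3]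
    · rw [if_neg h3]
      rw [List.take_of_length_le (by simp [List.length_append]; omega)]
  · rw [if_neg hpos]
    have h3 : tw.length = 3 := by have := hpre.length_le; omega
    have htwb : tw = b := hpre.eq_of_length (by omega)
    rw [List.take_append_of_le_length (by omega), ← htwb, List.take_of_length_le (by omega)]

-- appending one candidate to A's list = one bounded insertion on B's side
theorem pv_sorted_snoc (pats : List (List Int × Int)) (x : List Int × Int) :
    PySem.List.sorted (pats ++ [x]) pvKf true
      = PySem.List.insertBy (fun a b => decide (pvKf b < pvKf a)) x
          (PySem.List.sorted pats pvKf true) := by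
  rw [PySem.List.sorted_rev_eq_foldl_insertBy, PySem.List.sorted_rev_eq_foldl_insertBy,
    List.foldl_append]
  rfl

theorem pv_inv_step (pats : List (List Int × Int)) (best : List (Int × List Int))
    (hinv : pvInv pats best) (x : List Int × Int) :
    insertTop3 best (pvKf x) x.1
      = ((PySem.List.sorted (pats ++ [x]) pvKf true).take 3).map pvG := by
  have hlen : best.length ≤ 3 := by
    rw [hinv]; simp [List.length_take]
  rw [pv_insertTop3_eq best hlen]
  have hgx : ((pvKf x, x.1) : Int × List Int) = pvG x := rfl
  rw [hgx, hinv]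
  rw [← pv_map_insertBy (fun a b => decide (pvKf b < pvKf a))
    (fun a b => decide (b.1 < a.1)) pvG (by intro a b; rfl) x]
  rw [← List.map_take]
  congr 1
  rw [← pv_take_insertBy]
  rw [pv_sorted_snoc]

-- length of a window that fits
theorem pv_slc_length (data : List Int) (L i : Int) (hL : 0 < L) (hi : 0 ≤ i)
    (hfit : i + L ≤ (data.length : Int)) :
    ((pvSlc data L i).length : Int) = L := by
  have hab : (0:Int) ≤ i + L := by omega
  rw [pvSlc, PySem.List.slice_toNat data hi hab]
  simp only [List.length_take, List.length_drop]
  omega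

-- the per-length loop over window starts preserves the invariant
theorem pv_items (data : List Int) (L n : Int) (hn : n = (data.length : Int)) (hL : 0 < L) :
    ∀ (is : List Int), (∀ i ∈ is, 0 ≤ i ∧ i < n - L + 1) →
    ∀ pats best, pvInv pats best →
    pvInv (is.foldl (pvAstep data n L) pats)
          (is.foldl (pvBstep data L (pvBocc data n L)) best) := by
  intro is
  induction is with
  | nil => intro _ pats best h; exact h
  | cons i is ih =>
    intro hmem pats best hinv
    have hi := hmem i List.mem_cons_self
    have hmem' : ∀ j ∈ is, 0 ≤ j ∧ j < n - L + 1 := fun j hj => hmem j (List.mem_cons_of_mem _ hj)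
    simp only [List.foldl_cons]
    apply ih hmem'
    have hcount : (PySem.List.pyRange i (n - L + 1) L).foldl
        (fun occ j => if PySem.List.slice data (some j) (some (j + L))
            = PySem.List.slice data (some i) (some (i + L)) then occ + 1 else occ) 0
        = pvCnt data L (n - L + 1) i := by
      rw [pv_foldl_count (fun j => PySem.List.slice data (some j) (some (j + L))
        = PySem.List.slice data (some i) (some (i + L)))]
      rw [pvCnt]
      simp only [pvSlc, Int.zero_add]
      rfl
    have hocc : (pvBocc data n L).getD i 0 = pvCnt data L (n - L + 1) i :=
      pv_occ_all data L n hL i hi.1 hi.2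
    show pvInv (pvAstep data n L pats i) (pvBstep data L (pvBocc data n L) best i)
    rw [pvAstep, pvBstep]
    simp only [hocc, hcount]
    by_cases hge : pvCnt data L (n - L + 1) i ≥ 2
    · rw [if_pos hge, if_pos hge]
      have hslclen : ((PySem.List.slice data (some i) (some (i + L))).length : Int) = L :=
        pv_slc_length data L i hL hi.1 (by omega)
      have hkf : pvKf (PySem.List.slice data (some i) (some (i + L)), pvCnt data L (n - L + 1) i)
          = L * pvCnt data L (n - L + 1) i := by
        rw [pvKf]; rw [show ((PySem.List.slice data (some i) (some (i + L)),
          pvCnt data L (n - L + 1) i).1) = PySem.List.slice data (some i) (some (i + L)) from rfl,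
          hslclen]
      have hstep := pv_inv_step pats best hinv
        (PySem.List.slice data (some i) (some (i + L)), pvCnt data L (n - L + 1) i)
      rw [hkf] at hstep
      rw [pvInv]
      exact hstep
    · rw [if_neg hge, if_neg hge]
      exact hinv

-- the outer loop over pattern lengths preserves the invariant
theorem pv_Lfold (data : List Int) (n : Int) (hn : n = (data.length : Int)) :
    ∀ (ls : List Int), (∀ L ∈ ls, 0 < L) →
    ∀ pats best, pvInv pats best →
    pvInv (ls.foldl (fun pats pl =>
            (PySem.List.pyRange 0 (n - pl + 1) 1).foldl (pvAstep data n pl) pats) pats)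
          (ls.foldl (fun best len =>
            (PySem.List.pyRange 0 (n - len + 1) 1).foldl
              (pvBstep data len (pvBocc data n len)) best) best) := by
  intro ls
  induction ls with
  | nil => intro _ pats best h; exact h
  | cons L ls ih =>
    intro hmem pats best hinv
    simp only [List.foldl_cons]
    apply ih (fun L' hL' => hmem L' (List.mem_cons_of_mem _ hL'))
    apply pv_items data L n hn (hmem L List.mem_cons_self)
    · intro i hi
      have := PySem.List.mem_pyRange_one.mp hi
      omega
    · exact hinv

-- ===== VERDICT (by name: the statement is the Claim_ definition above) =====
theorem detect_list_patterns_py_spec : Claim_equal_detect_list_patterns_py := by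
  intro data _
  rw [Spec_detect_list_patterns_py]
  by_cases hlen : data.length < 2
  · rw [detect_list_patterns_py, detect_list_patterns_py_alt]
    simp [hlen]
  · have hA : detect_list_patterns_py data
        = (let patterns := (PySem.List.pyRange 1 (PySem.Int.floordiv (data.length : Int) 2 + 1) 1).foldl
            (fun pats pl => (PySem.List.pyRange 0 ((data.length : Int) - pl + 1) 1).foldl
              (pvAstep data (data.length : Int) pl) pats) []
          if patterns ≠ [] then
            (PySem.List.slice (PySem.List.sorted patterns pvKf true) none (some 3)).map
              (fun p => p.1)
          else []) := by
      rw [detect_list_patterns_py, if_neg hlen]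
      rfl
    have hB : detect_list_patterns_py_alt data
        = ((PySem.List.pyRange 1 (PySem.Int.floordiv (data.length : Int) 2 + 1) 1).foldl
            (fun best len => (PySem.List.pyRange 0 ((data.length : Int) - len + 1) 1).foldl
              (pvBstep data len (pvBocc data (data.length : Int) len)) best) []).map
          (fun p => p.2) := by
      rw [detect_list_patterns_py_alt]
      simp only [if_neg hlen]
      rfl
    rw [hA, hB]
    have hinv : pvInv
        ((PySem.List.pyRange 1 (PySem.Int.floordiv (data.length : Int) 2 + 1) 1).foldl
          (fun pats pl => (PySem.List.pyRange 0 ((data.length : Int) - pl + 1) 1).foldl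
            (pvAstep data (data.length : Int) pl) pats) [])
        ((PySem.List.pyRange 1 (PySem.Int.floordiv (data.length : Int) 2 + 1) 1).foldl
          (fun best len => (PySem.List.pyRange 0 ((data.length : Int) - len + 1) 1).foldl
            (pvBstep data len (pvBocc data (data.length : Int) len)) best) []) := by
      apply pv_Lfold data (data.length : Int) rfl
      · intro L hL
        have := PySem.List.mem_pyRange_one.mp hL
        omega
      · rw [pvInv]
        simp [PySem.List.sorted]
    set pats := (PySem.List.pyRange 1 (PySem.Int.floordiv (data.length : Int) 2 + 1) 1).foldl
      (fun pats pl => (PySem.List.pyRange 0 ((data.length : Int) - pl + 1) 1).foldl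
        (pvAstep data (data.length : Int) pl) pats) [] with hpats
    rw [hinv]
    by_cases hemp : pats = []
    · rw [hemp]
      simp [PySem.List.sorted]
    · rw [if_pos hemp]
      rw [PySem.List.slice_to (PySem.List.sorted pats pvKf true) (by norm_num : (0:Int) ≤ 3)]
      have h3 : ((3:Int)).toNat = 3 := rfl
      rw [h3]
      rw [List.map_map]
      rfl
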